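-- pv_equiv track=rewrite | github.com/MrBrantCode/unitest_baseline | mut_generate/mist_train_cf/cf_91084/solution.py | sum_and_count_distinct
-- ===== SOURCE A (Python) =====
-- def sum_and_count_distinct(arr):
--     # Create a dictionary to store the count of each distinct element
--     count_dict = {}
--
--     # Initialize the sum and count of distinct elements to zero
--     total_sum = 0
--     distinct_count = 0
--
--     # Iterate over the array
--     for num in arr:
--         # Add the current number to the sum
--         total_sum += num
--
--         # Check if the current number is already in the dictionary
--         if num in count_dict:
--             # If it is, increment its count by 1
--             count_dict[num] += 1
--         else:
--             # If it is not, add it to the dictionary with a count of 1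
--             count_dict[num] = 1
--             # Increment the count of distinct elements by 1
--             distinct_count += 1
--
--     # Return the sum and count of distinct elements
--     return total_sum, distinct_count
-- ===== SOURCE B (Python) =====
-- def sum_and_count_distinct(arr):
--     # sort first, then one adjacent-comparison scan: a new distinct value
--     # begins exactly where the sorted sequence changes (no hashing/dict at all)
--     s = sorted(arr)
--     total = 0
--     distinct = 0
--     prev = None
--     for x in s:
--         total += x
--         if prev is None or x != prev:
--             distinct += 1
--         prev = x
--     return total, distinct
-- ===== Notes on version B (the rewrite author's own statement) =====
-- stated objective: alternative
-- what changed: Replaced A's single hash-based pass (running dict with a membership branch) by a comparison-based sort-then-scan: sort the array, then count the positions where the sorted sequence changes value; no dictionary or membership test at all.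
import Mathlib
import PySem

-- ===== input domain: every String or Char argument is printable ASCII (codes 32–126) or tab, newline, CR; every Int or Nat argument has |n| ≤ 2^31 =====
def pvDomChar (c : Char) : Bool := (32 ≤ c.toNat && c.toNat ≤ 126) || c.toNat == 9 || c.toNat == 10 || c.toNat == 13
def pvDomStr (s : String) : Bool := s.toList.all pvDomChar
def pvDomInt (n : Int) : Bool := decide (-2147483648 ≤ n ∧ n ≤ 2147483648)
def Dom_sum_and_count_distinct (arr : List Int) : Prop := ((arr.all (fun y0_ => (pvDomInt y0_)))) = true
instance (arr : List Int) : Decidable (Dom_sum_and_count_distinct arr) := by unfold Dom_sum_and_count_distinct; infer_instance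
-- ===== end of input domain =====

-- B replaces A's single hash-based pass (running dict + membership branch) by a
-- comparison-based sort-then-scan: sort, then count positions where the value changes.

-- ===== PORT A =====
-- one fold over arr carrying (count_dict, total_sum, distinct_count), branching on membership
def sum_and_count_distinct (arr : List Int) : Int × Int :=
  let st := arr.foldl
    (fun (st : PySem.Dict Int Int × Int × Int) num =>
      let d := st.1
      let total := st.2.1 + num
      if d.contains num then
        (d.modify num 0 (· + 1), total, st.2.2)
      else
        (d.insert num 1, total, st.2.2 + 1))
    (PySem.Dict.empty, 0, 0)
  (st.2.1, st.2.2)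

-- ===== PORT B =====
-- s = sorted(arr); scan s with (total, distinct, prev), counting value changes
def sum_and_count_distinct_alt (arr : List Int) : Int × Int :=
  let s := PySem.List.sorted arr (fun x => x) false
  let st := s.foldl
    (fun (st : Int × Int × Option Int) x =>
      let total := st.1 + x
      let distinct :=
        match st.2.2 with
        | none => st.2.1 + 1
        | some p => if x ≠ p then st.2.1 + 1 else st.2.1
      (total, distinct, some x))
    (0, 0, none)
  (st.1, st.2.1)

-- ===== PRECONDITION & SPEC =====
def Spec_sum_and_count_distinct (arr : List Int) (out : Int × Int) : Prop := out = sum_and_count_distinct_alt arr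
instance (arr : List Int) (out : Int × Int) : Decidable (Spec_sum_and_count_distinct arr out) := by unfold Spec_sum_and_count_distinct; infer_instance

-- ===== CLAIM (what is proved, stated in full; the proofs are below) =====
def Claim_equal_sum_and_count_distinct : Prop := ∀ (arr : List Int), Dom_sum_and_count_distinct arr → Spec_sum_and_count_distinct arr (sum_and_count_distinct arr)

-- ===== LEMMAS AND PROOFS =====

-- A's loop invariant: total accumulates the sum, distinct_count counts keys added,
-- the dict's key list is the initial key list updated by arr
theorem sum_and_count_distinct_loop_inv (arr : List Int) :
    ∀ (d : PySem.Dict Int Int) (t c : Int),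
      (arr.foldl
        (fun (st : PySem.Dict Int Int × Int × Int) num =>
          let d := st.1
          let total := st.2.1 + num
          if d.contains num then
            (d.modify num 0 (· + 1), total, st.2.2)
          else
            (d.insert num 1, total, st.2.2 + 1))
        (d, t, c)).2.1 = t + arr.sum ∧
      (arr.foldl
        (fun (st : PySem.Dict Int Int × Int × Int) num =>
          let d := st.1
          let total := st.2.1 + num
          if d.contains num then
            (d.modify num 0 (· + 1), total, st.2.2)
          else
            (d.insert num 1, total, st.2.2 + 1))
        (d, t, c)).2.2 = c + ((PySem.Set.update d.keys arr).length : Int) - (d.keys.length : Int) ∧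
      (arr.foldl
        (fun (st : PySem.Dict Int Int × Int × Int) num =>
          let d := st.1
          let total := st.2.1 + num
          if d.contains num then
            (d.modify num 0 (· + 1), total, st.2.2)
          else
            (d.insert num 1, total, st.2.2 + 1))
        (d, t, c)).1.keys = PySem.Set.update d.keys arr := by
  induction arr with
  | nil =>
    intro d t c
    simp [PySem.Set.update]
  | cons num rest ih =>
    intro d t c
    simp only [List.foldl_cons]
    by_cases h : d.contains num = true
    · have hmem : num ∈ d.keys := (PySem.Dict.contains_iff_mem_keys d num).mp h
      have hupd : PySem.Set.update d.keys (num :: rest) = PySem.Set.update d.keys rest := by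
        rw [PySem.Set.update_cons, PySem.Set.add_of_mem hmem]
      have hk : (d.modify num 0 (· + 1)).keys = d.keys :=
        (PySem.Dict.keys_modify d num 0 (· + 1)).trans
          (PySem.Dict.keys_insert_of_contains d (d.getD num 0 + 1) h)
      rcases ih (d.modify num 0 (· + 1)) (t + num) c with ⟨h1, h2, h3⟩
      simp only [h, if_pos]
      refine ⟨?_, ?_, ?_⟩
      · rw [h1, List.sum_cons]; ring
      · rw [h2, hk, hupd]
      · rw [h3, hk, hupd]
    · have hnot : num ∉ d.keys := fun hm =>
        h ((PySem.Dict.contains_iff_mem_keys d num).mpr hm)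
      have hkeys : (d.insert num 1).keys = d.keys ++ [num] :=
        PySem.Dict.keys_insert_of_not_contains d 1 (by simpa using h)
      have hupd : PySem.Set.update d.keys (num :: rest) =
          PySem.Set.update (d.keys ++ [num]) rest := by
        rw [PySem.Set.update_cons, PySem.Set.add_of_not_mem hnot]
      rcases ih (d.insert num 1) (t + num) (c + 1) with ⟨h1, h2, h3⟩
      simp only [h, if_neg, Bool.false_eq_true, not_false_iff]
      refine ⟨?_, ?_, ?_⟩
      · rw [h1, List.sum_cons]; ring
      · rw [h2, hkeys, hupd]
        simp only [List.length_append, List.length_cons, List.length_nil]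
        push_cast; ring
      · rw [h3, hkeys, hupd]

-- helper: insert a set identity for counting
theorem card_insert_eq (a : Int) (t : Finset Int) :
    (insert a t).card = (t.erase a).card + 1 := by
  have h : insert a t = insert a (t.erase a) := by
    ext x; simp [Finset.mem_insert, Finset.mem_erase]; tauto
  rw [h, Finset.card_insert_of_notMem (Finset.notMem_erase a t)]

-- B's scan invariant on a ≤-sorted list: the distinct counter counts the
-- elements of s distinct from prev (as a finite set)
theorem scan_inv (s : List Int) :
    ∀ (t c : Int) (prev : Option Int),
      s.Pairwise (· ≤ ·) →
      (∀ x ∈ s, ∀ p, prev = some p → p ≤ x) →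
      (s.foldl
        (fun (st : Int × Int × Option Int) x =>
          let total := st.1 + x
          let distinct :=
            match st.2.2 with
            | none => st.2.1 + 1
            | some p => if x ≠ p then st.2.1 + 1 else st.2.1
          (total, distinct, some x))
        (t, c, prev)).1 = t + s.sum ∧
      (s.foldl
        (fun (st : Int × Int × Option Int) x =>
          let total := st.1 + x
          let distinct :=
            match st.2.2 with
            | none => st.2.1 + 1
            | some p => if x ≠ p then st.2.1 + 1 else st.2.1
          (total, distinct, some x))
        (t, c, prev)).2.1 =
        c + (((match prev with
               | none => s.toFinset
               | some p => s.toFinset.erase p).card : Int)) := by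
  induction s with
  | nil =>
    intro t c prev _ _
    cases prev <;> simp
  | cons a rest ih =>
    intro t c prev hs hlow
    have hs' : rest.Pairwise (· ≤ ·) := hs.of_cons
    have ha : ∀ x ∈ rest, a ≤ x := fun x hx => (List.pairwise_cons.mp hs).1 x hx
    have hlow' : ∀ x ∈ rest, ∀ p, (some a : Option Int) = some p → p ≤ x := by
      intro x hx p hp; cases hp; exact ha x hx
    cases prev with
    | none =>
      simp only [List.foldl_cons]
      rcases ih (t + a) (c + 1) (some a) hs' hlow' with ⟨h1, h2⟩
      constructor
      · rw [h1, List.sum_cons]; ring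
      · rw [h2]
        simp only [List.toFinset_cons]
        rw [card_insert_eq]
        push_cast; ring
    | some p =>
      have hpa : p ≤ a := hlow a (List.mem_cons_self) p rfl
      simp only [List.foldl_cons]
      by_cases hap : a = p
      · subst hap
        rcases ih (t + a) c (some a) hs' hlow' with ⟨h1, h2⟩
        simp only [ne_eq, not_true_eq_false, if_false]
        constructor
        · rw [h1, List.sum_cons]; ring
        · rw [h2]
          simp only [List.toFinset_cons]
          have he : (insert a rest.toFinset).erase a = rest.toFinset.erase a := by
            ext x; simp [Finset.mem_erase]
          rw [he]
      · have hplt : p < a := lt_of_le_of_ne hpa (fun h => hap h.symm)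
        have hpnot : p ∉ (a :: rest).toFinset := by
          simp only [List.toFinset_cons, Finset.mem_insert, List.mem_toFinset]
          push Not
          exact ⟨fun h => hap h.symm, fun hm => absurd (ha p hm) (not_le.mpr hplt)⟩
        rcases ih (t + a) (c + 1) (some a) hs' hlow' with ⟨h1, h2⟩
        simp only [ne_eq, hap, not_false_iff, if_pos]
        constructor
        · rw [h1, List.sum_cons]; ring
        · rw [h2, Finset.erase_eq_of_notMem hpnot]
          simp only [List.toFinset_cons]
          rw [card_insert_eq]
          push_cast; ring

-- the length of the ordered dedup equals the cardinality of the set of elements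
theorem ofList_length_eq_card (arr : List Int) :
    ((PySem.Set.ofList arr).length : Int) = (arr.toFinset.card : Int) := by
  have hnd : (PySem.Set.ofList arr).Nodup := PySem.Set.nodup_ofList arr
  have hfs : (PySem.Set.ofList arr).toFinset = arr.toFinset := by
    ext x; simp [List.mem_toFinset, PySem.Set.mem_ofList]
  have := List.toFinset_card_of_nodup hnd
  rw [hfs] at this
  exact_mod_cast this.symm

-- ===== VERDICT (by name: the statement is the Claim_ definition above) =====
theorem sum_and_count_distinct_spec : Claim_equal_sum_and_count_distinct := by
  intro arr _
  unfold Spec_sum_and_count_distinct sum_and_count_distinct sum_and_count_distinct_alt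
  rcases sum_and_count_distinct_loop_inv arr PySem.Dict.empty 0 0 with ⟨h1, h2, _⟩
  have hke : (PySem.Dict.empty : PySem.Dict Int Int).keys = [] := by
    simp [PySem.Dict.keys_empty]
  rw [hke, PySem.Set.update_nil_left] at h2
  have hperm : (PySem.List.sorted arr (fun x => x) false).Perm arr :=
    PySem.List.sorted_perm arr (fun x => x) false
  have hpair : (PySem.List.sorted arr (fun x => x) false).Pairwise (· ≤ ·) :=
    PySem.List.sorted_pairwise arr (fun x => x)
  rcases scan_inv (PySem.List.sorted arr (fun x => x) false) 0 0 none hpair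
      (by intro x _ p hp; cases hp) with ⟨g1, g2⟩
  simp only []
  rw [Prod.ext_iff]
  constructor
  · rw [h1, g1, hperm.sum_eq]
  · rw [h2, g2, List.toFinset_eq_of_perm _ _ hperm, ofList_length_eq_card]
    simp
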